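-- pv_equiv track=rewrite | github.com/b-dilly/MTGArenaBrawlDeckBuilder | main.py | format_decklist
-- ===== SOURCE A (Python) =====
-- def format_decklist(deck_list):
--     plains_count = deck_list.count("Plains")
--     island_count = deck_list.count("Island")
--     swamp_count = deck_list.count("Swamp")
--     mountain_count = deck_list.count("Mountain")
--     forest_count = deck_list.count("Forest")
--     wastes_count = deck_list.count("Wastes")
--     updated_list = []
--
--     for item in deck_list:
--         if item == "Plains":
--             # Skip appending additional "Forest"
--             continue
--         if item == "Island":
--             # Skip appending additional "Forest"
--             continue
--         if item == "Swamp":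
--             # Skip appending additional "Forest"
--             continue
--         if item == "Mountain":
--             # Skip appending additional "Forest"
--             continue
--         if item == "Forest":
--             # Skip appending additional "Forest"
--             continue
--         if item == "Wastes":
--             # Skip appending additional "Forest"
--             continue
--         updated_list.append(f"1 {item}")
--
--     # Add the forest count as a single entry
--     if plains_count > 0:
--         updated_list.append(f"{plains_count} Plains")
--     if island_count > 0:
--         updated_list.append(f"{island_count} Island")
--     if swamp_count > 0:
--         updated_list.append(f"{swamp_count} Swamp")
--     if mountain_count > 0:
--         updated_list.append(f"{mountain_count} Mountain")
--     if forest_count > 0: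
--         updated_list.append(f"{forest_count} Forest")
--     if wastes_count > 0:
--         updated_list.append(f"{wastes_count} Wastes")
--
--     return updated_list
-- ===== SOURCE B (Python) =====
-- def format_decklist(deck_list):
--     # one pass: count the six basic lands while collecting everything else
--     p = i = s = m = f = w = 0
--     result = []
--     for item in deck_list:
--         if item == "Plains":
--             p += 1
--         elif item == "Island":
--             i += 1
--         elif item == "Swamp":
--             s += 1
--         elif item == "Mountain":
--             m += 1
--         elif item == "Forest":
--             f += 1
--         elif item == "Wastes":
--             w += 1
--         else:
--             result.append("1 " + item)
--     for c, name in ((p, "Plains"), (i, "Island"), (s, "Swamp"),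
--                     (m, "Mountain"), (f, "Forest"), (w, "Wastes")):
--         if c > 0:
--             result.append(str(c) + " " + name)
--     return result
-- ===== Notes on version B (the rewrite author's own statement) =====
-- stated objective: simpler
-- what changed: Replaces six full .count() scans plus a separate filter loop by a single pass that maintains per-land counts and the non-land list at once, then emits the six land lines from the counts.
import Mathlib
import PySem

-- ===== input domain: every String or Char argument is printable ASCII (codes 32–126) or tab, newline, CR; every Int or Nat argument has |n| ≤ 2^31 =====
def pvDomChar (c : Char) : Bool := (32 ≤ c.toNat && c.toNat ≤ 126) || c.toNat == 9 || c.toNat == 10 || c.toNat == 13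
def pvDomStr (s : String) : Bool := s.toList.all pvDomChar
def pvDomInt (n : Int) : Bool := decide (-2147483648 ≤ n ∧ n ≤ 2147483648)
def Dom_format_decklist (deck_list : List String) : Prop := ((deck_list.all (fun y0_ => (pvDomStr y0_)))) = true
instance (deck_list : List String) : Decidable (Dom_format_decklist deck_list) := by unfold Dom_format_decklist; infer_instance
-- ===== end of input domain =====

-- B replaces A's six full .count() scans plus a separate filter loop by one pass
-- maintaining six counters and the non-land list together (objective: simpler).


-- ===== PORT A =====
def format_decklist (deck_list : List String) : List String :=
  let plains_count : Int := PySem.List.count deck_list "Plains"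
  let island_count : Int := PySem.List.count deck_list "Island"
  let swamp_count : Int := PySem.List.count deck_list "Swamp"
  let mountain_count : Int := PySem.List.count deck_list "Mountain"
  let forest_count : Int := PySem.List.count deck_list "Forest"
  let wastes_count : Int := PySem.List.count deck_list "Wastes"
  let updated_list : List String :=
    deck_list.foldl (fun acc item =>
      if item = "Plains" then acc
      else if item = "Island" then acc
      else if item = "Swamp" then acc
      else if item = "Mountain" then acc
      else if item = "Forest" then acc
      else if item = "Wastes" then acc
      else acc ++ ["1 " ++ item]) []
  let u1 := if plains_count > 0 then updated_list ++ [PySem.Int.toStr plains_count ++ " Plains"] else updated_list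
  let u2 := if island_count > 0 then u1 ++ [PySem.Int.toStr island_count ++ " Island"] else u1
  let u3 := if swamp_count > 0 then u2 ++ [PySem.Int.toStr swamp_count ++ " Swamp"] else u2
  let u4 := if mountain_count > 0 then u3 ++ [PySem.Int.toStr mountain_count ++ " Mountain"] else u3
  let u5 := if forest_count > 0 then u4 ++ [PySem.Int.toStr forest_count ++ " Forest"] else u4
  let u6 := if wastes_count > 0 then u5 ++ [PySem.Int.toStr wastes_count ++ " Wastes"] else u5
  u6

-- ===== PORT B =====
-- one loop step of Source B: update the six counters or append to the result list
def pvBStep (st : Int × Int × Int × Int × Int × Int × List String) (item : String) :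
    Int × Int × Int × Int × Int × Int × List String :=
  match st with
  | (p, i, s, m, f, w, result) =>
    if item = "Plains" then (p + 1, i, s, m, f, w, result)
    else if item = "Island" then (p, i + 1, s, m, f, w, result)
    else if item = "Swamp" then (p, i, s + 1, m, f, w, result)
    else if item = "Mountain" then (p, i, s, m + 1, f, w, result)
    else if item = "Forest" then (p, i, s, m, f + 1, w, result)
    else if item = "Wastes" then (p, i, s, m, f, w + 1, result)
    else (p, i, s, m, f, w, result ++ ["1 " ++ item])

def format_decklist_alt (deck_list : List String) : List String :=
  match deck_list.foldl pvBStep (0, 0, 0, 0, 0, 0, []) with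
  | (p, i, s, m, f, w, result) =>
    [(p, "Plains"), (i, "Island"), (s, "Swamp"), (m, "Mountain"), (f, "Forest"), (w, "Wastes")].foldl
      (fun acc cn => if cn.1 > 0 then acc ++ [PySem.Int.toStr cn.1 ++ " " ++ cn.2] else acc) result

-- ===== PRECONDITION & SPEC =====
def Spec_format_decklist (deck_list : List String) (out : List String) : Prop := out = format_decklist_alt deck_list
instance (deck_list : List String) (out : List String) : Decidable (Spec_format_decklist deck_list out) := by unfold Spec_format_decklist; infer_instance

-- ===== CLAIM (what is proved, stated in full; the proofs are below) =====
def Claim_equal_format_decklist : Prop := ∀ (deck_list : List String), Dom_format_decklist deck_list → Spec_format_decklist deck_list (format_decklist deck_list)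

-- ===== LEMMAS AND PROOFS =====

-- the six basic-land names as a Bool test (used only in the proofs)
def pvIsLand (x : String) : Bool :=
  x == "Plains" || x == "Island" || x == "Swamp" || x == "Mountain" || x == "Forest" || x == "Wastes"

-- B's single pass computes the six counts and A's filtered non-land list
lemma pvBStep_fold (dl : List String) (p i s m f w : Int) (rest : List String) :
    dl.foldl pvBStep (p, i, s, m, f, w, rest) =
      (p + PySem.List.count dl "Plains", i + PySem.List.count dl "Island",
       s + PySem.List.count dl "Swamp", m + PySem.List.count dl "Mountain",
       f + PySem.List.count dl "Forest", w + PySem.List.count dl "Wastes",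
       rest ++ (dl.filter (fun x => !pvIsLand x)).map (fun x => "1 " ++ x)) := by
  induction dl generalizing p i s m f w rest with
  | nil => simp [PySem.List.count_eq]
  | cons h t ih =>
    simp only [List.foldl_cons, pvBStep]
    by_cases h1 : h = "Plains" <;> by_cases h2 : h = "Island" <;> by_cases h3 : h = "Swamp" <;>
      by_cases h4 : h = "Mountain" <;> by_cases h5 : h = "Forest" <;> by_cases h6 : h = "Wastes" <;>
      simp_all [PySem.List.count_eq, pvIsLand] <;> ring_nf

-- A's loop is the filtered non-land list
lemma pvALoop_eq (dl : List String) :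
    dl.foldl (fun acc item =>
      if item = "Plains" then acc
      else if item = "Island" then acc
      else if item = "Swamp" then acc
      else if item = "Mountain" then acc
      else if item = "Forest" then acc
      else if item = "Wastes" then acc
      else acc ++ ["1 " ++ item]) [] =
      (dl.filter (fun x => !pvIsLand x)).map (fun x => "1 " ++ x) := by
  have hstep : (fun (acc : List String) (item : String) =>
      if item = "Plains" then acc
      else if item = "Island" then acc
      else if item = "Swamp" then acc
      else if item = "Mountain" then acc
      else if item = "Forest" then acc
      else if item = "Wastes" then acc
      else acc ++ ["1 " ++ item]) =
      (fun acc x => if (!pvIsLand x) = true then acc ++ [(fun y => "1 " ++ y) x] else acc) := by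
    funext acc x
    by_cases h1 : x = "Plains" <;> by_cases h2 : x = "Island" <;> by_cases h3 : x = "Swamp" <;>
      by_cases h4 : x = "Mountain" <;> by_cases h5 : x = "Forest" <;> by_cases h6 : x = "Wastes" <;>
      simp_all [pvIsLand]
  rw [hstep, PySem.List.foldl_append_if]
  simp

-- ===== VERDICT (by name: the statement is the Claim_ definition above) =====
theorem format_decklist_spec : Claim_equal_format_decklist := by
  intro dl _
  unfold Spec_format_decklist format_decklist format_decklist_alt
  rw [pvBStep_fold, pvALoop_eq]
  have h1 : (" " ++ "Plains" : String) = " Plains" := rfl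
  have h2 : (" " ++ "Island" : String) = " Island" := rfl
  have h3 : (" " ++ "Swamp" : String) = " Swamp" := rfl
  have h4 : (" " ++ "Mountain" : String) = " Mountain" := rfl
  have h5 : (" " ++ "Forest" : String) = " Forest" := rfl
  have h6 : (" " ++ "Wastes" : String) = " Wastes" := rfl
  simp only [List.foldl_cons, List.foldl_nil, zero_add, String.append_assoc, h1, h2, h3, h4, h5, h6,
    List.nil_append]
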